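-- pv_equiv track=rewrite | github.com/rubbieKelvin/webnote | apps/backend/core/lib/cx.py | intToCrypt
-- ===== SOURCE A (Python) =====
-- from string import digits
--
-- alpha = 'dZkyLBuopAwKCqrsaHejzbcXgfVWihIJNExDnTYFQStOGUlmRPvM'
--
-- def intToCrypt(value: int) -> str:
--     value = str(value)
--     res = ''
--     alpha_ = alpha
--     for i in value:
--         if i in digits:
--             i = int(i)
--             res += ''.join(alpha_[i:i+2])
--             alpha_ = alpha_[2:] + alpha_[:2]
--     return res
-- ===== SOURCE B (Python) =====
-- alpha = 'dZkyLBuopAwKCqrsaHejzbcXgfVWihIJNExDnTYFQStOGUlmRPvM'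
--
-- def intToCrypt(value: int) -> str:
--     n = len(alpha)
--     out = []
--     k = 0  # number of digits consumed so far
--     for ch in str(value):
--         if ch.isdigit():
--             d = int(ch)
--             out.append(alpha[(2 * k + d) % n])
--             out.append(alpha[(2 * k + d + 1) % n])
--             k += 1
--     return ''.join(out)
-- ===== Notes on version B (the rewrite author's own statement) =====
-- stated objective: simpler
-- what changed: B drops A's rotating-alphabet string state (two slice+concat rotations per digit) and instead computes each output pair directly by modular index arithmetic on the fixed alphabet, keeping only an integer counter of digits seen.
import Mathlib
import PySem

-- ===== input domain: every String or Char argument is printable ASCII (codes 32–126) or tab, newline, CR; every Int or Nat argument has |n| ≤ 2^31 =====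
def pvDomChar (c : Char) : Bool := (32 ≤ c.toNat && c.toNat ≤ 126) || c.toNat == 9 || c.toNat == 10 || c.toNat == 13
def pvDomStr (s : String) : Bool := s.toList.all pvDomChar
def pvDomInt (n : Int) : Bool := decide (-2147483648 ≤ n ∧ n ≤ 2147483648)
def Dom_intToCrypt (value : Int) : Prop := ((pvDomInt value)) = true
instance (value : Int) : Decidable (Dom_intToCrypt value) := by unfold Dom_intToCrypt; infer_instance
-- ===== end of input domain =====

-- B replaces A's rotating-alphabet string state with direct modular index arithmetic on the
-- fixed alphabet, indexed modulo its length (objective: simpler). Return values only; neither program mutates anything.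

-- the module-level constant `alpha`
def alphaChars : List Char := "dZkyLBuopAwKCqrsaHejzbcXgfVWihIJNExDnTYFQStOGUlmRPvM".toList

-- ===== PORT A =====
-- loop body of A: state = (res, alpha_)
def stepA (st : List Char × List Char) (i : Char) : List Char × List Char :=
  if ("0123456789".toList).contains i then          -- if i in digits (i is a 1-char string: char membership, exact)
    let iv : Int := (PySem.Int.ofChars? [i]).getD 0 -- i = int(i); exact: the guard ensures a one-digit string
    (st.1 ++ PySem.List.slice st.2 (some iv) (some (iv + 2)),                     -- res += ''.join(alpha_[i:i+2])
     PySem.List.slice st.2 (some 2) none ++ PySem.List.slice st.2 none (some 2))  -- alpha_ = alpha_[2:] + alpha_[:2]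
  else st

def intToCrypt (value : Int) : String :=
  String.mk ((PySem.Int.toChars value).foldl stepA (([] : List Char), alphaChars)).1

-- ===== PORT B =====
-- loop body of B: state = (out, k)
def stepB (st : List Char × Nat) (ch : Char) : List Char × Nat :=
  if PySem.Chars.isdigit ch then                    -- ch.isdigit()
    let d := ch.toNat - 48                          -- d = int(ch); exact on digit chars
    (st.1 ++ [alphaChars.getD ((2 * st.2 + d) % alphaChars.length) ' ',           -- alpha[(2k+d) % n]: index in range, getD exact
              alphaChars.getD ((2 * st.2 + d + 1) % alphaChars.length) ' '],
     st.2 + 1)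
  else st

def intToCrypt_alt (value : Int) : String :=
  String.mk ((PySem.Int.toChars value).foldl stepB (([] : List Char), 0)).1

-- ===== PRECONDITION & SPEC =====
def Spec_intToCrypt (value : Int) (out : String) : Prop := out = intToCrypt_alt value
instance (value : Int) (out : String) : Decidable (Spec_intToCrypt value out) := by unfold Spec_intToCrypt; infer_instance

-- ===== CLAIM (what is proved, stated in full; the proofs are below) =====
def Claim_equal_intToCrypt : Prop := ∀ (value : Int), Dom_intToCrypt value → Spec_intToCrypt value (intToCrypt value)

-- ===== LEMMAS AND PROOFS =====

-- A's membership test `i in digits` and B's `ch.isdigit()` are the same predicate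
theorem isdigit_eq_contains (c : Char) : PySem.Chars.isdigit c = ("0123456789".toList).contains c := by
  simp only [PySem.Chars.isdigit, List.contains_eq_mem]
  rcases c with ⟨v, hv⟩
  simp [Char.le_def, UInt32.le_iff_toNat_le]
  by_cases hd : 48 ≤ v.toNat ∧ v.toNat ≤ 57
  · obtain ⟨h1, h2⟩ := hd
    simp only [decide_eq_true h1, decide_eq_true h2, Bool.true_and]
    symm
    simp only [Bool.or_eq_true, decide_eq_true_eq]
    interval_cases h : v.toNat <;>
      first
      | exact (show _ from by simp [show ({ val := v, valid := hv } : Char) = '0' from Char.ext (UInt32.toNat_inj.mp (by rw [h]; rfl))])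
      | exact (show _ from by simp [show ({ val := v, valid := hv } : Char) = '1' from Char.ext (UInt32.toNat_inj.mp (by rw [h]; rfl))])
      | exact (show _ from by simp [show ({ val := v, valid := hv } : Char) = '2' from Char.ext (UInt32.toNat_inj.mp (by rw [h]; rfl))])
      | exact (show _ from by simp [show ({ val := v, valid := hv } : Char) = '3' from Char.ext (UInt32.toNat_inj.mp (by rw [h]; rfl))])
      | exact (show _ from by simp [show ({ val := v, valid := hv } : Char) = '4' from Char.ext (UInt32.toNat_inj.mp (by rw [h]; rfl))])
      | exact (show _ from by simp [show ({ val := v, valid := hv } : Char) = '5' from Char.ext (UInt32.toNat_inj.mp (by rw [h]; rfl))])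
      | exact (show _ from by simp [show ({ val := v, valid := hv } : Char) = '6' from Char.ext (UInt32.toNat_inj.mp (by rw [h]; rfl))])
      | exact (show _ from by simp [show ({ val := v, valid := hv } : Char) = '7' from Char.ext (UInt32.toNat_inj.mp (by rw [h]; rfl))])
      | exact (show _ from by simp [show ({ val := v, valid := hv } : Char) = '8' from Char.ext (UInt32.toNat_inj.mp (by rw [h]; rfl))])
      | exact (show _ from by simp [show ({ val := v, valid := hv } : Char) = '9' from Char.ext (UInt32.toNat_inj.mp (by rw [h]; rfl))])
  · have h12 : ¬(48 ≤ v.toNat) ∨ ¬(v.toNat ≤ 57) := by omega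
    have hne : ∀ d : Char, 48 ≤ d.toNat → d.toNat ≤ 57 → ({ val := v, valid := hv } : Char) ≠ d := by
      intro d hd1 hd2 he
      have : v.toNat = d.toNat := by rw [← he]; rfl
      rcases h12 with h | h <;> omega
    rcases h12 with h | h <;>
      simp [decide_eq_false h, hne '0' (by decide) (by decide), hne '1' (by decide) (by decide),
        hne '2' (by decide) (by decide), hne '3' (by decide) (by decide), hne '4' (by decide) (by decide),
        hne '5' (by decide) (by decide), hne '6' (by decide) (by decide), hne '7' (by decide) (by decide),
        hne '8' (by decide) (by decide), hne '9' (by decide) (by decide)]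

theorem alphaChars_len : alphaChars.length = 52 := by decide

theorem digits_list : "0123456789".toList = ['0','1','2','3','4','5','6','7','8','9'] := by decide

-- A's slice alpha_[d:d+2] on the alphabet rotated left by m is B's pair of modular lookups
theorem rot_pair (m d : Nat) (hd : d + 2 ≤ 52) :
    PySem.List.slice (alphaChars.rotate m) (some (d : Int)) (some ((d : Int) + 2)) =
      [alphaChars.getD ((m + d) % 52) ' ', alphaChars.getD ((m + d + 1) % 52) ' '] := by
  have hrl : (alphaChars.rotate m).length = 52 := by rw [List.length_rotate, alphaChars_len]
  rw [show ((d : Int) + 2) = (((d + 2 : Nat)) : Int) by push_cast; ring]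
  rw [PySem.List.slice_natCast]
  rw [show d + 2 - d = 2 from by omega]
  rw [List.drop_eq_getElem_cons (by omega : d < (alphaChars.rotate m).length)]
  rw [List.drop_eq_getElem_cons (by omega : d + 1 < (alphaChars.rotate m).length)]
  simp only [List.take_succ_cons, List.take_zero]
  rw [List.getElem_rotate, List.getElem_rotate]
  rw [← List.getD_eq_getElem alphaChars ' ', ← List.getD_eq_getElem alphaChars ' ']
  simp only [alphaChars_len]
  rw [show (d + m) % 52 = (m + d) % 52 from by omega,
      show (d + 1 + m) % 52 = (m + d + 1) % 52 from by omega]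

-- A's alpha_[2:] + alpha_[:2] advances the rotation by 2
theorem rot_step (m : Nat) :
    PySem.List.slice (alphaChars.rotate m) (some 2) none ++ PySem.List.slice (alphaChars.rotate m) none (some 2) =
      alphaChars.rotate (m + 2) := by
  rw [PySem.List.slice_from _ (show (0:Int) ≤ 2 by norm_num), PySem.List.slice_to _ (show (0:Int) ≤ 2 by norm_num)]
  rw [show ((2 : Int)).toNat = 2 from rfl]
  rw [← List.rotate_eq_drop_append_take (by rw [List.length_rotate, alphaChars_len]; omega)]
  rw [List.rotate_rotate]

-- one digit step of the two loops, for a digit char c of value d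
theorem digit_case (rest : List Char) (k : Nat) (res : List Char) (c : Char) (d : Nat)
    (hc : ("0123456789".toList).contains c = true)
    (hd : PySem.Chars.isdigit c = true)
    (hiv : (PySem.Int.ofChars? [c]).getD 0 = (d : Int))
    (hdn : c.toNat - 48 = d)
    (hdlt : d + 2 ≤ 52)
    (ih' : ∀ res, (rest.foldl stepA (res, alphaChars.rotate (2*k+2))).1 = (rest.foldl stepB (res, k+1)).1) :
    (rest.foldl stepA (stepA (res, alphaChars.rotate (2*k)) c)).1 =
      (rest.foldl stepB (stepB (res, k) c)).1 := by
  simp only [stepA, stepB, if_pos hc, if_pos hd, hiv, hdn]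
  rw [rot_pair (2*k) d hdlt, rot_step]
  simp only [alphaChars_len]
  exact ih' _

-- loop invariant: A's alpha_ after k accepted digits is the alphabet rotated left by 2*k
theorem loop_eq (cs : List Char) : ∀ (k : Nat) (res : List Char),
    (cs.foldl stepA (res, alphaChars.rotate (2 * k))).1 = (cs.foldl stepB (res, k)).1 := by
  induction cs with
  | nil => intro k res; rfl
  | cons c rest ih =>
    intro k res
    simp only [List.foldl_cons]
    by_cases h : PySem.Chars.isdigit c = true
    · have hmem : c ∈ ("0123456789".toList) := by
        have hc := isdigit_eq_contains c
        rw [h] at hc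
        exact List.contains_iff_mem.mp hc.symm
      have ih' := ih (k + 1)
      rw [show 2 * (k + 1) = 2 * k + 2 from by ring] at ih'
      rw [digits_list] at hmem
      simp only [List.mem_cons, List.not_mem_nil, or_false] at hmem
      rcases hmem with rfl|rfl|rfl|rfl|rfl|rfl|rfl|rfl|rfl|rfl <;>
        first
        | exact digit_case rest k res _ 0 (by decide) h (by decide) (by decide) (by norm_num) ih'
        | exact digit_case rest k res _ 1 (by decide) h (by decide) (by decide) (by norm_num) ih'
        | exact digit_case rest k res _ 2 (by decide) h (by decide) (by decide) (by norm_num) ih'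
        | exact digit_case rest k res _ 3 (by decide) h (by decide) (by decide) (by norm_num) ih'
        | exact digit_case rest k res _ 4 (by decide) h (by decide) (by decide) (by norm_num) ih'
        | exact digit_case rest k res _ 5 (by decide) h (by decide) (by decide) (by norm_num) ih'
        | exact digit_case rest k res _ 6 (by decide) h (by decide) (by decide) (by norm_num) ih'
        | exact digit_case rest k res _ 7 (by decide) h (by decide) (by decide) (by norm_num) ih'
        | exact digit_case rest k res _ 8 (by decide) h (by decide) (by decide) (by norm_num) ih'
        | exact digit_case rest k res _ 9 (by decide) h (by decide) (by decide) (by norm_num) ih'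
    · simp only [stepA, stepB,
        if_neg (show ¬ ("0123456789".toList).contains c = true by rw [← isdigit_eq_contains]; exact h),
        if_neg h]
      exact ih k res

-- ===== VERDICT (by name: the statement is the Claim_ definition above) =====
theorem intToCrypt_spec : Claim_equal_intToCrypt := by
  intro value _
  show intToCrypt value = intToCrypt_alt value
  unfold intToCrypt intToCrypt_alt
  have h := loop_eq (PySem.Int.toChars value) 0 []
  rw [show 2 * 0 = 0 from rfl, List.rotate_zero] at h
  rw [h]
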